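-- pv_equiv track=rewrite | github.com/tkxksdl2/algorithm-programers | kakao/호텔 방 배정/solution.py | solution
-- ===== SOURCE A (Python) =====
-- def solution(k, room_number):
--     room_dict = dict()
--     answer = []
--
--     for n in room_number:
--         temp = []
--         while n in room_dict:
--             temp.append(n)
--             n = room_dict[n]
--         room_dict[n] = n+1
--         for n_temp in temp:
--             room_dict[n_temp] = n+1
--
--         answer.append(n)
--
--     return answer
-- ===== SOURCE B (Python) =====
-- def solution(k, room_number):
--     occupied = set()
--     answer = []
--     for n in room_number:
--         while n in occupied:
--             n += 1
--         occupied.add(n)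
--         answer.append(n)
--     return answer
-- ===== Notes on version B (the rewrite author's own statement) =====
-- stated objective: simpler
-- what changed: Replaces the pointer-dict union-find (chain walk plus temp-list path compression) with a plain occupied-set and a linear upward probe for the first free room, which is shorter and needs no pointer bookkeeping.
import Mathlib
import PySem

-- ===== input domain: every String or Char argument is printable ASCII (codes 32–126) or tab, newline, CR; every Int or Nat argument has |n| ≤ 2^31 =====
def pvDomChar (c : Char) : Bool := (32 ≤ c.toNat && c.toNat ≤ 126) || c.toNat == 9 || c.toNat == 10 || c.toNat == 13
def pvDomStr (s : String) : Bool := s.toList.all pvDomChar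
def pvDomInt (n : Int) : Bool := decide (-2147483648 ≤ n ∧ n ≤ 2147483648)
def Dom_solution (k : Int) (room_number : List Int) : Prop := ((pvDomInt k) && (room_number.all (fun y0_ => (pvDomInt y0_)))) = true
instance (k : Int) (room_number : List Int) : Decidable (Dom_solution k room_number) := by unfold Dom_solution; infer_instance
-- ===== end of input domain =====

-- B replaces A's pointer-dict union-find with a plain occupied-set and a linear upward probe (simpler; not faster).


-- ===== PORT A =====
-- the 'while n in room_dict' chain walk; fuel = number of dict keys + 1 (the chain visits
-- distinct keys with strictly increasing values, so this fuel is always sufficient — proved below)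
def pvChase (d : PySem.Dict Int Int) : Nat → Int → List Int → List Int × Int
  | 0, n, temp => (temp, n)
  | f + 1, n, temp =>
    match d.get? n with
    | none => (temp, n)
    | some m => pvChase d f m (temp ++ [n])

def pvStepA (st : PySem.Dict Int Int × List Int) (n : Int) : PySem.Dict Int Int × List Int :=
  let r := pvChase st.1 (st.1.size + 1) n []
  let d1 := st.1.insert r.2 (r.2 + 1)
  let d2 := r.1.foldl (fun d t => d.insert t (r.2 + 1)) d1
  (d2, st.2 ++ [r.2])

def solution (k : Int) (room_number : List Int) : List Int :=
  (room_number.foldl pvStepA (PySem.Dict.empty, [])).2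

-- ===== PORT B =====
-- the 'while n in occupied: n += 1' probe; fuel = |occupied| + 1 (always sufficient — proved below)
def pvScan (occ : PySem.Set Int) : Nat → Int → Int
  | 0, n => n
  | f + 1, n => if PySem.Set.contains occ n then pvScan occ f (n + 1) else n

def pvStepB (st : PySem.Set Int × List Int) (n : Int) : PySem.Set Int × List Int :=
  let s := pvScan st.1 (st.1.length + 1) n
  (PySem.Set.add st.1 s, st.2 ++ [s])

def solution_alt (k : Int) (room_number : List Int) : List Int :=
  (room_number.foldl pvStepB (PySem.Set.empty, [])).2

-- ===== PRECONDITION & SPEC =====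
def Spec_solution (k : Int) (room_number : List Int) (out : List Int) : Prop := out = solution_alt k room_number
instance (k : Int) (room_number : List Int) (out : List Int) : Decidable (Spec_solution k room_number out) := by unfold Spec_solution; infer_instance

-- ===== CLAIM (what is proved, stated in full; the proofs are below) =====
def Claim_equal_solution : Prop := ∀ (k : Int) (room_number : List Int), Dom_solution k room_number → Spec_solution k room_number (solution k room_number)

-- ===== LEMMAS AND PROOFS =====

-- A's dict invariant: every key points strictly upward and every room between a key and its
-- target is itself a key (so the chain never skips a free room).
def pvInv (d : PySem.Dict Int Int) : Prop :=
  ∀ x v, d.get? x = some v → x < v ∧ ∀ y, x ≤ y → y < v → (d.get? y).isSome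

def pvKeysGE (d : PySem.Dict Int Int) (n : Int) : Nat :=
  ((PySem.Dict.keys d).filter (fun x => decide (n ≤ x))).length

def pvOccGE (occ : List Int) (n : Int) : Nat :=
  (occ.filter (fun x => decide (n ≤ x))).length

theorem pvFilterGE_lt (l : List Int) (n m : Int) (hn : n ∈ l) (hm : n < m) :
    (l.filter (fun x => decide (m ≤ x))).length < (l.filter (fun x => decide (n ≤ x))).length := by
  have hsub : l.filter (fun x => decide (m ≤ x))
      = (l.filter (fun x => decide (n ≤ x))).filter (fun x => decide (m ≤ x)) := by
    rw [List.filter_filter]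
    apply List.filter_congr
    intro x _
    by_cases h : m ≤ x
    · have hnx : n ≤ x := by omega
      simp [h, hnx]
    · simp [h]
  rw [hsub, List.length_filter_lt_length_iff_exists]
  exact ⟨n, by simp [List.mem_filter, hn], by simp; omega⟩

theorem pvKeysGE_lt (d : PySem.Dict Int Int) (n m : Int) (hn : n ∈ PySem.Dict.keys d)
    (hm : n < m) : pvKeysGE d m < pvKeysGE d n :=
  pvFilterGE_lt _ n m hn hm

theorem pvChase_spec (d : PySem.Dict Int Int) (hInv : pvInv d) :
    ∀ (f : Nat) (n : Int) (temp : List Int), pvKeysGE d n < f →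
    n ≤ (pvChase d f n temp).2 ∧ d.get? (pvChase d f n temp).2 = none ∧
    (∀ y, n ≤ y → y < (pvChase d f n temp).2 → (d.get? y).isSome) ∧
    ∃ tl, (pvChase d f n temp).1 = temp ++ tl ∧
      ∀ t ∈ tl, n ≤ t ∧ t < (pvChase d f n temp).2 ∧ (d.get? t).isSome := by
  intro f
  induction f with
  | zero => intro n temp h; exact absurd h (Nat.not_lt_zero _)
  | succ f ih =>
    intro n temp hf
    cases hg : d.get? n with
    | none =>
      simp only [pvChase, hg]
      refine ⟨le_refl n, by trivial, by intro y h1 h2; omega, [], by simp, by simp⟩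
    | some m =>
      simp only [pvChase, hg]
      obtain ⟨hnm, hint⟩ := hInv n m hg
      have hmem : n ∈ PySem.Dict.keys d := by
        by_contra hc
        rw [← PySem.Dict.get?_eq_none_iff_not_mem_keys] at hc
        simp [hg] at hc
      have hlt : pvKeysGE d m < f :=
        lt_of_lt_of_le (pvKeysGE_lt d n m hmem hnm) (Nat.lt_succ_iff.mp hf)
      obtain ⟨h1, h2, h3, tl, htl, htl2⟩ := ih m (temp ++ [n]) hlt
      refine ⟨by omega, h2, ?_, n :: tl, ?_, ?_⟩
      · intro y hy1 hy2
        rcases lt_or_ge y m with hy | hy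
        · exact hint y hy1 hy
        · exact h3 y hy hy2
      · rw [htl]; simp
      · intro t ht
        rcases List.mem_cons.mp ht with rfl | ht
        · exact ⟨le_refl t, by omega, by simp [hg]⟩
        · obtain ⟨ha, hb, hc⟩ := htl2 t ht
          exact ⟨by omega, hb, hc⟩

theorem pvScan_spec (occ : PySem.Set Int) :
    ∀ (f : Nat) (n : Int), pvOccGE occ n < f →
    n ≤ pvScan occ f n ∧ pvScan occ f n ∉ occ ∧
    ∀ y, n ≤ y → y < pvScan occ f n → y ∈ occ := by
  intro f
  induction f with
  | zero => intro n h; exact absurd h (Nat.not_lt_zero _)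
  | succ f ih =>
    intro n hf
    simp only [pvScan]
    by_cases hn : n ∈ occ
    · rw [if_pos (by simp [PySem.Set.contains_eq_listContains, hn])]
      have hlt : pvOccGE occ (n + 1) < f :=
        lt_of_lt_of_le (pvFilterGE_lt occ n (n + 1) hn (by omega)) (Nat.lt_succ_iff.mp hf)
      obtain ⟨h1, h2, h3⟩ := ih (n + 1) hlt
      refine ⟨by omega, h2, ?_⟩
      intro y hy1 hy2
      rcases eq_or_lt_of_le hy1 with rfl | hy
      · exact hn
      · exact h3 y (by omega) hy2
    · rw [if_neg (by simp [PySem.Set.contains_eq_listContains, hn])]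
      exact ⟨le_refl n, hn, by intro y h1 h2; omega⟩

theorem pvLeast_unique (P : Int → Prop) (n s1 s2 : Int)
    (h1 : n ≤ s1 ∧ ¬ P s1 ∧ ∀ y, n ≤ y → y < s1 → P y)
    (h2 : n ≤ s2 ∧ ¬ P s2 ∧ ∀ y, n ≤ y → y < s2 → P y) : s1 = s2 := by
  rcases lt_trichotomy s1 s2 with h | h | h
  · exact absurd (h2.2.2 s1 h1.1 h) h1.2.1
  · exact h
  · exact absurd (h1.2.2 s2 h2.1 h) h2.2.1

theorem pvGet?_foldl_insert_const (tl : List Int) (d : PySem.Dict Int Int) (v x : Int) :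
    ((tl.foldl (fun d t => d.insert t v) d).get? x) = if x ∈ tl then some v else d.get? x := by
  induction tl generalizing d with
  | nil => simp
  | cons t ts ih =>
    simp only [List.foldl_cons, ih, List.mem_cons, PySem.Dict.get?_insert]
    by_cases h1 : x ∈ ts <;> by_cases h2 : x = t <;> simp [h1, h2]

theorem pvStep_agree (d : PySem.Dict Int Int) (occ : PySem.Set Int) (ans : List Int) (n : Int)
    (hInv : pvInv d) (hEq : ∀ x, (d.get? x).isSome ↔ x ∈ occ) :
    (pvStepA (d, ans) n).2 = (pvStepB (occ, ans) n).2 ∧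
    pvInv (pvStepA (d, ans) n).1 ∧
    ∀ x, ((pvStepA (d, ans) n).1.get? x).isSome ↔ x ∈ (pvStepB (occ, ans) n).1 := by
  have hszk : (PySem.Dict.keys d).length = d.size := by simp [PySem.Dict.keys, PySem.Dict.size]
  have hfA : pvKeysGE d n < d.size + 1 := by
    have := List.length_filter_le (fun x => decide (n ≤ x)) (PySem.Dict.keys d)
    unfold pvKeysGE; omega
  have hfB : pvOccGE occ n < occ.length + 1 := by
    have := List.length_filter_le (fun x => decide (n ≤ x)) occ
    unfold pvOccGE; omega
  obtain ⟨hs1, hs2, hs3, tl, htl, htl2⟩ := pvChase_spec d hInv (d.size + 1) n [] hfA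
  simp only [List.nil_append] at htl
  obtain ⟨hb1, hb2, hb3⟩ := pvScan_spec occ (occ.length + 1) n hfB
  have hss' : (pvChase d (d.size + 1) n []).2 = pvScan occ (occ.length + 1) n := by
    apply pvLeast_unique (fun y => y ∈ occ) n
    · exact ⟨hs1, by rw [← hEq]; simp [hs2], fun y hy1 hy2 => (hEq y).mp (hs3 y hy1 hy2)⟩
    · exact ⟨hb1, hb2, hb3⟩
  have hd2 : ∀ x, ((pvStepA (d, ans) n).1.get? x)
      = if x ∈ tl then some ((pvChase d (d.size + 1) n []).2 + 1)
        else if x = (pvChase d (d.size + 1) n []).2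
        then some ((pvChase d (d.size + 1) n []).2 + 1) else d.get? x := by
    intro x
    simp only [pvStepA, htl]
    rw [pvGet?_foldl_insert_const, PySem.Dict.get?_insert]
  refine ⟨?_, ?_, ?_⟩
  · -- the two appended answers agree
    simp only [pvStepA, pvStepB]
    rw [hss']
  · -- A's dict invariant is preserved
    intro x v hx
    rw [hd2] at hx
    split_ifs at hx with hx1 hx2
    · injection hx with hv
      obtain ⟨hxn, hxs, _⟩ := htl2 x hx1
      refine ⟨by omega, ?_⟩
      intro y hy1 hy2
      rw [hd2]
      split_ifs with g1 g2
      · simp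
      · simp
      · exact hs3 y (by omega) (by omega)
    · injection hx with hv
      refine ⟨by omega, ?_⟩
      intro y hy1 hy2
      have hy : y = (pvChase d (d.size + 1) n []).2 := by omega
      rw [hd2]
      split_ifs <;> simp_all
    · obtain ⟨hxv, hint⟩ := hInv x v hx
      refine ⟨hxv, ?_⟩
      intro y hy1 hy2
      rw [hd2]
      split_ifs with g1 g2
      · simp
      · simp
      · exact hint y hy1 hy2
  · -- the key set matches the occupied set
    intro x
    have hmemB : (pvStepB (occ, ans) n).1
        = PySem.Set.add occ ((pvChase d (d.size + 1) n []).2) := by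
      simp only [pvStepB]
      rw [hss']
    rw [hmemB, hd2, PySem.Set.mem_add]
    split_ifs with h1 h2
    · simp only [Option.isSome_some, true_iff]
      exact Or.inl ((hEq x).mp (htl2 x h1).2.2)
    · simp [h2]
    · rw [hEq x]
      constructor
      · exact Or.inl
      · rintro (h | rfl)
        · exact h
        · exact absurd rfl h2

theorem pv_main (l : List Int) :
    ∀ (d : PySem.Dict Int Int) (occ : PySem.Set Int) (ans : List Int),
    pvInv d → (∀ x, (d.get? x).isSome ↔ x ∈ occ) →
    (l.foldl pvStepA (d, ans)).2 = (l.foldl pvStepB (occ, ans)).2 := by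
  induction l with
  | nil => intro _ _ _ _ _; rfl
  | cons n l ih =>
    intro d occ ans hInv hEq
    obtain ⟨hans, hInv', hEq'⟩ := pvStep_agree d occ ans n hInv hEq
    simp only [List.foldl_cons]
    have hA : pvStepA (d, ans) n = ((pvStepA (d, ans) n).1, (pvStepA (d, ans) n).2) := rfl
    have hB : pvStepB (occ, ans) n = ((pvStepB (occ, ans) n).1, (pvStepB (occ, ans) n).2) := rfl
    rw [hA, hB, hans]
    exact ih _ _ _ hInv' hEq'

-- ===== VERDICT (by name: the statement is the Claim_ definition above) =====
theorem solution_spec : Claim_equal_solution := by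
  intro k room_number _
  unfold Spec_solution solution solution_alt
  exact pv_main room_number PySem.Dict.empty PySem.Set.empty []
    (by intro x v h; simp [PySem.Dict.get?_empty] at h)
    (by intro x; simp [PySem.Dict.get?_empty, PySem.Set.empty])
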